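-- pv_equiv track=rewrite | github.com/springggin/DataStructures | LAB/Lab 4 - Coding Solutions.py | find_missingb
-- ===== SOURCE A (Python) =====
-- def find_missingb(lst):
--     """
--     The key idea is that the missing value is the first index i where
--     lst[i] != i. We will binary search for this index.
--
--     Furthermore, if lst[i] != i, then lst[j] != j for all j > i.
--     i.e. once the index and the value don't correspond, they will never correspond again
--
--     (If you are not convinced of this fact, try some examples)
--
--     Thus, if we check whether middle value has this property, we can adjust the range accordingly.
--     """
--     left = 0
--     right = len(lst) - 1
--
--     # Edge cases: first num missing
--     if len(lst) == 0:
--         return 0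
--     # last num missing
--     if lst[right] == right: #if lst[right] == right, there is no index where lst[i] != i. Thus, the missing value is the length of the list itself
--         return len(lst)
--
--     while left < right:
--         mid = (left + right) // 2 # get middle index
--         if lst[mid] != mid:
--             right = mid
--             """
--             Note that we need to keep recursing. If lst[mid] = mid, we don't know for sure if mid is the first index
--             where this is not true. We just know that the first one must be to the left of mid.
--             """
--         else:
--             left = mid + 1
--             """
--             mid is for sure not the index we are looking for, so left becomes mid + 1, not just mid.
--             We always want to be searching a valid range
--             """
--
--     return left # or right, as when the loop breaks, left == right (because we are always searching a valid range)
-- ===== SOURCE B (Python) =====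
-- def find_missingb(lst):
--     n = len(lst)
--     if n == 0:
--         return 0
--     if lst[n - 1] == n - 1:
--         return n
--     def go(seg, base):
--         # divide and conquer on an actual sublist: seg == lst[base:base+len(seg)]
--         if not seg:
--             return base
--         h = len(seg) // 2
--         if seg[h] != base + h:
--             return go(seg[:h], base)
--         else:
--             return go(seg[h + 1:], base + h + 1)
--     return go(lst[:n - 1], 0)
-- ===== Notes on version B (the rewrite author's own statement) =====
-- stated objective: alternative
-- what changed: Replaces A's iterative index-based binary search with a divide-and-conquer recursion that physically slices the list, carrying a shrinking sublist plus a base offset instead of left/right indices into the original list.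
import Mathlib
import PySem

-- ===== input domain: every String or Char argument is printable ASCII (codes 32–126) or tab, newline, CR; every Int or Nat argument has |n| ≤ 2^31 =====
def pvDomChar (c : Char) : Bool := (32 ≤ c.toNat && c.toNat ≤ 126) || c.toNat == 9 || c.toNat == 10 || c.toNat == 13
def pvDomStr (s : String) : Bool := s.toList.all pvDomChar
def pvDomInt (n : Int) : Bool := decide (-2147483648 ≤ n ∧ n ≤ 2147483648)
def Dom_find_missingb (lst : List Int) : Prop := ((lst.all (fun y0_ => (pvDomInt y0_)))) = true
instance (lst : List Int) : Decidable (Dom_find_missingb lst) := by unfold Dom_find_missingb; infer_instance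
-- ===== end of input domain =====

-- B replaces A's iterative left/right binary search by a divide-and-conquer recursion
-- that slices the list and carries a base offset (alternative decomposition, not faster).

-- ===== PORT A =====
-- A's while loop over the pair (left, right); fuel is only a totality guard: each
-- iteration shrinks right - left by at least 1, so fuel = lst.length never runs out.
-- Indices hit are always in range, so pyGetD's default is never used.
def pvLoopA (lst : List Int) (fuel : Nat) (left right : Int) : Int :=
  match fuel with
  | 0 => left
  | fuel + 1 =>
    if left < right then
      let mid := PySem.Int.floordiv (left + right) 2
      if PySem.List.pyGetD lst mid 0 ≠ mid then
        pvLoopA lst fuel left mid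
      else
        pvLoopA lst fuel (mid + 1) right
    else
      left

def find_missingb (lst : List Int) : Int :=
  if lst.length = 0 then 0
  else if PySem.List.pyGetD lst ((lst.length : Int) - 1) 0 = (lst.length : Int) - 1 then
    (lst.length : Int)
  else
    pvLoopA lst lst.length 0 ((lst.length : Int) - 1)

-- ===== PORT B =====
-- B's recursive go(seg, base) on actual sublists; fuel is only a totality guard (each call
-- strictly shrinks seg, so fuel = lst.length never runs out); len(seg)//2 is Nat division
-- (exact: len ≥ 0), seg[:h] = seg.take h and seg[h+1:] = seg.drop (h+1)
-- (PySem.List.slice_to_natCast / slice_from_natCast), seg[h] via pyGetD (h < len seg always)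
def pvGoB (fuel : Nat) (seg : List Int) (base : Int) : Int :=
  match fuel with
  | 0 => base
  | fuel + 1 =>
    if seg.length = 0 then base
    else
      let h := seg.length / 2
      if PySem.List.pyGetD seg (h : Int) 0 ≠ base + (h : Int) then
        pvGoB fuel (seg.take h) base
      else
        pvGoB fuel (seg.drop (h + 1)) (base + (h : Int) + 1)

def find_missingb_alt (lst : List Int) : Int :=
  let n := lst.length
  if n = 0 then 0
  else if PySem.List.pyGetD lst ((n : Int) - 1) 0 = (n : Int) - 1 then (n : Int)
  else pvGoB lst.length (lst.take (n - 1)) 0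

-- ===== PRECONDITION & SPEC =====
def Spec_find_missingb (lst : List Int) (out : Int) : Prop := out = find_missingb_alt lst
instance (lst : List Int) (out : Int) : Decidable (Spec_find_missingb lst out) := by unfold Spec_find_missingb; infer_instance

-- ===== CLAIM (what is proved, stated in full; the proofs are below) =====
def Claim_equal_find_missingb : Prop := ∀ (lst : List Int), Dom_find_missingb lst → Spec_find_missingb lst (find_missingb lst)

-- ===== LEMMAS AND PROOFS =====

-- invariant: B's sublist recursion on lst[left:right] with base = left computes A's loop
-- on (left, right); the two step in lockstep, so one shared fuel suffices
theorem pvGoB_eq_pvLoopA (lst : List Int) :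
    ∀ (fuel left right : Nat), right - left ≤ fuel → left ≤ right → right ≤ lst.length →
      pvGoB fuel ((lst.drop left).take (right - left)) (left : Int)
        = pvLoopA lst fuel (left : Int) (right : Int) := by
  intro fuel
  induction fuel with
  | zero => intro left right hf _ _; rfl
  | succ fuel ih =>
    intro left right hf hlr hrl
    rw [pvGoB, pvLoopA]
    have hseglen : ((lst.drop left).take (right - left)).length = right - left := by
      simp only [List.length_take, List.length_drop]; omega
    by_cases hlt : left < right
    · rw [if_neg (by omega), if_pos (by exact_mod_cast hlt : (left:Int) < (right:Int))]
      have hh : ((lst.drop left).take (right - left)).length / 2 = (right - left) / 2 := by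
        omega
      set k := (right - left) / 2 with hk
      have hkb : k < right - left := by omega
      have hmid : PySem.Int.floordiv ((left:Int) + (right:Int)) 2 = ((left + k : Nat) : Int) := by
        rw [PySem.Int.floordiv_eq_ediv_of_pos (by omega : (0:Int) < 2)]
        omega
      have hget : PySem.List.pyGetD ((lst.drop left).take (right - left)) ((k : Nat) : Int) 0
          = PySem.List.pyGetD lst (((left + k : Nat) : Int)) 0 := by
        simp only [PySem.List.pyGetD_natCast, List.getD, List.getElem?_take,
          List.getElem?_drop, if_pos hkb]
      have hcast : (left : Int) + (k : Int) = ((left + k : Nat) : Int) := by push_cast; ring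
      simp only [hh, hget, hmid, hcast]
      split_ifs with hp
      · have hseg : ((lst.drop left).take (right - left)).take k
            = (lst.drop left).take ((left + k) - left) := by
          rw [List.take_take, (by omega : min k (right - left) = (left + k) - left)]
        rw [hseg, ih left (left + k) (by omega) (by omega) (by omega)]
      · have hseg : ((lst.drop left).take (right - left)).drop (k + 1)
            = (lst.drop (left + k + 1)).take (right - (left + k + 1)) := by
          rw [List.drop_take, List.drop_drop,
            (by omega : right - left - (k + 1) = right - (left + k + 1)),
            (by omega : left + (k + 1) = left + k + 1)]
        have hbase : ((left + k : Nat) : Int) + 1 = ((left + k + 1 : Nat) : Int) := by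
          push_cast; ring
        rw [hseg, hbase, ih (left + k + 1) right (by omega) (by omega) (by omega)]
    · rw [if_pos (by omega), if_neg (by exact_mod_cast hlt : ¬ ((left:Int) < (right:Int)))]

-- ===== VERDICT (by name: the statement is the Claim_ definition above) =====
theorem find_missingb_spec : Claim_equal_find_missingb := by
  intro lst _
  unfold Spec_find_missingb find_missingb find_missingb_alt
  by_cases h0 : lst.length = 0
  · simp [h0]
  · simp only [if_neg h0]
    by_cases h1 : PySem.List.pyGetD lst ((lst.length : Int) - 1) 0 = (lst.length : Int) - 1
    · simp [h1]
    · simp only [if_neg h1]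
      have := pvGoB_eq_pvLoopA lst lst.length 0 (lst.length - 1) (by omega) (by omega) (by omega)
      simp only [List.drop_zero, Nat.sub_zero, Nat.cast_zero] at this
      rw [show ((lst.length : Int) - 1) = ((lst.length - 1 : Nat) : Int) by omega]
      exact this.symm
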